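-- pv_equiv track=rewrite | github.com/knutae/adventofcode | 2024/14/solve.py | connectedness_score
-- ===== SOURCE A (Python) =====
-- def connectedness_score(robots):
--     positions = set(p for p, _ in robots)
--     score = 0
--     for x, y in positions:
--         for adjacent in [(x-1,y), (x+1,y), (x,y-1), (x,y+1)]:
--             if adjacent in positions:
--                 score += 1
--     return score
-- ===== SOURCE B (Python) =====
-- def connectedness_score(robots):
--     positions = set(p for p, _ in robots)
--     right = set((x + 1, y) for x, y in positions)
--     down = set((x, y + 1) for x, y in positions)
--     return 2 * (len(positions & right) + len(positions & down))
-- ===== Notes on version B (the rewrite author's own statement) =====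
-- stated objective: alternative
-- what changed: Instead of scanning four neighbours of every position, B intersects the deduplicated position set with its right-shifted and down-shifted copies and returns twice the sum of the two intersection sizes.
import Mathlib
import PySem

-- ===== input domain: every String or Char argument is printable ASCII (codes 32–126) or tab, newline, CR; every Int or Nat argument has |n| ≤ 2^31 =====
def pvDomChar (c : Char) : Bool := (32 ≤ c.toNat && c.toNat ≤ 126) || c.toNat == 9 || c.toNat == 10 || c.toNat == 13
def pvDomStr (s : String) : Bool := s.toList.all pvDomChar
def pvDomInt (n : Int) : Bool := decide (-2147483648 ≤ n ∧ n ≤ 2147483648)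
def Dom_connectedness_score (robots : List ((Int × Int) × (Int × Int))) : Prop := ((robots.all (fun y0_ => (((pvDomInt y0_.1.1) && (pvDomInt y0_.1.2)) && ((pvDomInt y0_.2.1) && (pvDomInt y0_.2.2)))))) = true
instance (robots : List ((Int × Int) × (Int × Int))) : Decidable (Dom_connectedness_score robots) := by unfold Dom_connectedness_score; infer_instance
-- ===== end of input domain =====

-- B replaces A's four-neighbour scan per position by intersecting the position set
-- with its right- and down-shifted copies (doubled); same value, alternative algorithm.

-- ===== PORT A =====
def connectedness_score (robots : List ((Int × Int) × (Int × Int))) : Int :=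
  let positions : PySem.Set (Int × Int) := PySem.Set.ofList (robots.map (fun r => r.1))
  positions.foldl
    (fun score xy =>
      [(xy.1 - 1, xy.2), (xy.1 + 1, xy.2), (xy.1, xy.2 - 1), (xy.1, xy.2 + 1)].foldl
        (fun s adjacent => if PySem.Set.contains positions adjacent then s + 1 else s) score)
    0

-- ===== PORT B =====
def connectedness_score_alt (robots : List ((Int × Int) × (Int × Int))) : Int :=
  let positions : PySem.Set (Int × Int) := PySem.Set.ofList (robots.map (fun r => r.1))
  let right : PySem.Set (Int × Int) := PySem.Set.ofList (positions.map (fun p => (p.1 + 1, p.2)))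
  let down : PySem.Set (Int × Int) := PySem.Set.ofList (positions.map (fun p => (p.1, p.2 + 1)))
  2 * (PySem.Set.len (PySem.Set.inter positions right) + PySem.Set.len (PySem.Set.inter positions down))

-- ===== PRECONDITION & SPEC =====
def Spec_connectedness_score (robots : List ((Int × Int) × (Int × Int))) (out : Int) : Prop := out = connectedness_score_alt robots
instance (robots : List ((Int × Int) × (Int × Int))) (out : Int) : Decidable (Spec_connectedness_score robots out) := by unfold Spec_connectedness_score; infer_instance

-- ===== CLAIM (what is proved, stated in full; the proofs are below) =====
def Claim_equal_connectedness_score : Prop := ∀ (robots : List ((Int × Int) × (Int × Int))), Dom_connectedness_score robots → Spec_connectedness_score robots (connectedness_score robots)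

-- ===== LEMMAS AND PROOFS =====

-- A's nested loop, as a sum of four neighbour counts over the iterated list.
lemma pv_fold4 (T S : List (Int × Int)) (init : Int) :
    S.foldl
      (fun score xy =>
        [(xy.1 - 1, xy.2), (xy.1 + 1, xy.2), (xy.1, xy.2 - 1), (xy.1, xy.2 + 1)].foldl
          (fun s adjacent => if PySem.Set.contains T adjacent then s + 1 else s) score)
      init
    = init + (S.countP (fun p => T.contains (p.1 - 1, p.2)) : Int)
        + (S.countP (fun p => T.contains (p.1 + 1, p.2)) : Int)
        + (S.countP (fun p => T.contains (p.1, p.2 - 1)) : Int)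
        + (S.countP (fun p => T.contains (p.1, p.2 + 1)) : Int) := by
  induction S generalizing init with
  | nil => simp
  | cons hd tl ih =>
    rw [List.foldl_cons, ih]
    simp only [List.foldl_cons, List.foldl_nil, List.countP_cons, PySem.Set.contains]
    split_ifs <;> push_cast <;> ring

-- membership in the shifted copy of a list
lemma pv_mem_shift (S : List (Int × Int)) (dx dy : Int) (q : Int × Int) :
    q ∈ S.map (fun p => (p.1 + dx, p.2 + dy)) ↔ (q.1 - dx, q.2 - dy) ∈ S := by
  constructor
  · rintro h
    obtain ⟨p, hp, rfl⟩ := List.mem_map.mp h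
    simpa using hp
  · intro h
    exact List.mem_map.mpr ⟨(q.1 - dx, q.2 - dy), h, by simp⟩

-- on a duplicate-free list, counting p with p+d present = counting q with q-d present
lemma pv_countP_shift (S : List (Int × Int)) (h : S.Nodup) (dx dy : Int) :
    S.countP (fun p => decide ((p.1 + dx, p.2 + dy) ∈ S)) =
    S.countP (fun q => decide ((q.1 - dx, q.2 - dy) ∈ S)) := by
  rw [List.countP_eq_length_filter, List.countP_eq_length_filter,
      ← List.toFinset_card_of_nodup (h.filter _), ← List.toFinset_card_of_nodup (h.filter _)]
  apply Finset.card_bij' (fun p _ => ((p.1 + dx, p.2 + dy) : Int × Int))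
      (fun q _ => ((q.1 - dx, q.2 - dy) : Int × Int))
  · intro p hp
    simp only [List.mem_toFinset, List.mem_filter, decide_eq_true_eq] at hp ⊢
    exact ⟨hp.2, by simpa using hp.1⟩
  · intro q hq
    simp only [List.mem_toFinset, List.mem_filter, decide_eq_true_eq] at hq ⊢
    exact ⟨hq.2, by simpa using hq.1⟩
  · intro p hp; simp
  · intro q hq; simp

theorem connectedness_score_eq_alt (robots : List ((Int × Int) × (Int × Int))) :
    connectedness_score robots = connectedness_score_alt robots := by
  simp only [connectedness_score, connectedness_score_alt]
  set S : List (Int × Int) := PySem.Set.ofList (robots.map (fun r => r.1)) with hS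
  have hnd : S.Nodup := PySem.Set.nodup_ofList _
  rw [pv_fold4]
  simp only [PySem.Set.inter, PySem.Set.len, PySem.Set.contains,
    ← List.countP_eq_length_filter, List.contains_eq_mem]
  have hright : ∀ q : Int × Int,
      (q ∈ PySem.Set.ofList (S.map (fun p => (p.1 + 1, p.2)))) ↔ (q.1 - 1, q.2) ∈ S := by
    intro q
    have := pv_mem_shift S 1 0 q
    simp only [add_zero, sub_zero] at this
    rw [PySem.Set.mem_ofList, this]
  have hdown : ∀ q : Int × Int,
      (q ∈ PySem.Set.ofList (S.map (fun p => (p.1, p.2 + 1)))) ↔ (q.1, q.2 - 1) ∈ S := by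
    intro q
    have := pv_mem_shift S 0 1 q
    simp only [add_zero, sub_zero] at this
    rw [PySem.Set.mem_ofList, this]
  simp only [hright, hdown]
  have h1 := pv_countP_shift S hnd 1 0
  have h2 := pv_countP_shift S hnd 0 1
  simp only [add_zero, sub_zero] at h1 h2
  rw [h1, h2]
  ring

-- ===== VERDICT (by name: the statement is the Claim_ definition above) =====
theorem connectedness_score_spec : Claim_equal_connectedness_score := by
  intro robots _
  unfold Spec_connectedness_score
  exact connectedness_score_eq_alt robots
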